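-- pv_equiv track=rewrite | github.com/simonbbbb/ImageFoundry | scripts/build-selective.py | calculate_build_priority
-- ===== SOURCE A (Python) =====
-- def calculate_build_priority(images, config):
--     """Calculate build priority based on usage and dependencies"""
--     tools = config.get('tools', {})
--
--     # Priority factors
--     priorities = {}
--     for img in images:
--         priority = 0
--
--         # Base images have higher priority
--         if img == 'ubuntu-24.04':
--             priority += 10
--         elif img == 'ubuntu-22.04':
--             priority += 8
--         elif img == 'alpine-3.20':
--             priority += 6
--
--         # Check if essential tools are enabled
--         if tools.get('languages', {}).get('go', {}).get('install', False):
--             priority += 5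
--         if tools.get('security', {}).get('trivy', {}).get('install', False):
--             priority += 4
--         if tools.get('devops', {}).get('docker', {}).get('install', False):
--             priority += 3
--
--         priorities[img] = priority
--
--     # Sort by priority (highest first)
--     return sorted(images, key=lambda x: priorities.get(x, 0), reverse=True)
-- ===== SOURCE B (Python) =====
-- def calculate_build_priority(images, config):
--     """Calculate build priority based on usage and dependencies"""
--     # Any enabled-tool bonus is added to every image alike, so it can never change
--     # the order.  A stable descending sort by priority therefore reduces to: the
--     # known base images in their fixed rank order, then everything else, each
--     # group keeping input order.  Bucket concatenation replaces scoring + sorting.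
--     ranked = ('ubuntu-24.04', 'ubuntu-22.04', 'alpine-3.20')
--     out = []
--     for base in ranked:
--         out += [img for img in images if img == base]
--     out += [img for img in images if img not in ranked]
--     return out
-- ===== Notes on version B (the rewrite author's own statement) =====
-- stated objective: alternative
-- what changed: Replaces per-image scoring plus a descending sort with bucket concatenation: since the tool bonus is the same for every image, the stable sort's output is provably just the three ranked base images followed by the rest in input order, so B never computes a priority and never sorts.
import Mathlib
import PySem

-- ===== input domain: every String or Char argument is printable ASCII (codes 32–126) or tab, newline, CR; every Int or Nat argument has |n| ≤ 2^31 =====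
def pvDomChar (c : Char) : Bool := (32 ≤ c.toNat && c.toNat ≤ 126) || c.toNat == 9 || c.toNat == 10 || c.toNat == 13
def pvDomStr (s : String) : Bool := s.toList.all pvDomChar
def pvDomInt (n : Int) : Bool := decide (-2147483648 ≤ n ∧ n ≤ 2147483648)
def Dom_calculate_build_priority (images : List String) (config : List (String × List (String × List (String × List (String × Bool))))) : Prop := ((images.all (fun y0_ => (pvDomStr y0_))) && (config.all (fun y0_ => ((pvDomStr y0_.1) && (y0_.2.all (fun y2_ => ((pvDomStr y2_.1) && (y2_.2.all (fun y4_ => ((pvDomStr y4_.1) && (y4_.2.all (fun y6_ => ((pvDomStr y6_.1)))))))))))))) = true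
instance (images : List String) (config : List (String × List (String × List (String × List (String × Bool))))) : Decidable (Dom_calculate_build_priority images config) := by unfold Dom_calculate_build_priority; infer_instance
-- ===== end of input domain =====

-- B replaces A's per-image scoring + stable descending sort with bucket concatenation:
-- the tool bonus is image-independent, so the sorted order is just the ranked base
-- images followed by the rest in input order (objective: alternative, no sort at all).


-- ===== PORT A =====
def calculate_build_priority (images : List String) (config : List (String × List (String × List (String × List (String × Bool))))) : List String :=
  let tools : List (String × List (String × List (String × Bool))) :=
    PySem.Dict.getD ⟨config⟩ "tools" []
  let priorities : PySem.Dict String Int :=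
    images.foldl (fun d img =>
      let priority : Int := 0
      let priority : Int :=
        if img = "ubuntu-24.04" then priority + 10
        else if img = "ubuntu-22.04" then priority + 8
        else if img = "alpine-3.20" then priority + 6
        else priority
      let priority : Int :=
        if PySem.Dict.getD ⟨PySem.Dict.getD ⟨PySem.Dict.getD ⟨tools⟩ "languages" []⟩ "go" []⟩ "install" false
        then priority + 5 else priority
      let priority : Int :=
        if PySem.Dict.getD ⟨PySem.Dict.getD ⟨PySem.Dict.getD ⟨tools⟩ "security" []⟩ "trivy" []⟩ "install" false
        then priority + 4 else priority
      let priority : Int :=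
        if PySem.Dict.getD ⟨PySem.Dict.getD ⟨PySem.Dict.getD ⟨tools⟩ "devops" []⟩ "docker" []⟩ "install" false
        then priority + 3 else priority
      d.insert img priority) ⟨[]⟩
  PySem.List.sorted images (fun x => priorities.getD x 0) true

-- ===== PORT B =====
def calculate_build_priority_alt (images : List String) (config : List (String × List (String × List (String × List (String × Bool))))) : List String :=
  let ranked : List String := ["ubuntu-24.04", "ubuntu-22.04", "alpine-3.20"]
  (ranked.foldl (fun out base => out ++ images.filter (fun img => img == base)) [])
    ++ images.filter (fun img => !ranked.contains img)

-- ===== PRECONDITION & SPEC =====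
def Spec_calculate_build_priority (images : List String) (config : List (String × List (String × List (String × List (String × Bool))))) (out : List String) : Prop := out = calculate_build_priority_alt images config
instance (images : List String) (config : List (String × List (String × List (String × List (String × Bool))))) (out : List String) : Decidable (Spec_calculate_build_priority images config out) := by unfold Spec_calculate_build_priority; infer_instance

-- ===== CLAIM =====
def Claim_equal_calculate_build_priority : Prop := ∀ (images : List String) (config : List (String × List (String × List (String × List (String × Bool))))), Dom_calculate_build_priority images config → Spec_calculate_build_priority images config (calculate_build_priority images config)

-- ===== LEMMAS AND PROOFS =====

-- rank class of an image: 0,1,2 for the three ranked base images, 3 otherwise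
def pvCls (s : String) : Nat :=
  if s = "ubuntu-24.04" then 0 else if s = "ubuntu-22.04" then 1
  else if s = "alpine-3.20" then 2 else 3

-- the bucket normal form: images grouped by rank class, input order kept inside each group
def pvBuckets (xs : List String) : List String :=
  xs.filter (fun i => pvCls i == 0) ++ xs.filter (fun i => pvCls i == 1)
    ++ xs.filter (fun i => pvCls i == 2) ++ xs.filter (fun i => pvCls i == 3)

-- a dict built by inserting (img, f img) over a list answers f k on members of the list
theorem getD_foldl_insert {ν : Type} (f : String → ν) (images : List String)
    (d0 : PySem.Dict String ν) (k : String) (v0 : ν) :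
    PySem.Dict.getD (images.foldl (fun d img => d.insert img (f img)) d0) k v0
      = if k ∈ images then f k else d0.getD k v0 := by
  induction images generalizing d0 with
  | nil => simp
  | cons x xs ih =>
    simp only [List.foldl_cons, ih, PySem.Dict.getD_insert, List.mem_cons]
    by_cases hk : k ∈ xs <;> by_cases hx : k = x <;> simp [hk, hx]

-- insertBy only compares the inserted element against members of the list
theorem insertBy_congr {α : Type} (b1 b2 : α → α → Bool) (x : α) (ys : List α)
    (h : ∀ y ∈ ys, b1 x y = b2 x y) :
    PySem.List.insertBy b1 x ys = PySem.List.insertBy b2 x ys := by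
  induction ys with
  | nil => rfl
  | cons y ys ih =>
    simp only [PySem.List.insertBy]
    rw [h y (List.mem_cons_self ..)]
    by_cases hb : b2 x y = true <;>
      simp [hb, ih (fun z hz => h z (List.mem_cons_of_mem _ hz))]

theorem foldl_insertBy_congr {α : Type} (b1 b2 : α → α → Bool) (S : List α)
    (h : ∀ a ∈ S, ∀ b ∈ S, b1 a b = b2 a b) :
    ∀ (xs acc : List α), (∀ x ∈ xs, x ∈ S) → (∀ y ∈ acc, y ∈ S) →
      xs.foldl (fun acc x => PySem.List.insertBy b1 x acc) acc
        = xs.foldl (fun acc x => PySem.List.insertBy b2 x acc) acc := by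
  intro xs
  induction xs with
  | nil => intro acc _ _; rfl
  | cons x xs ih =>
    intro acc hxs hacc
    have hx : x ∈ S := hxs x (List.mem_cons_self ..)
    simp only [List.foldl_cons]
    rw [insertBy_congr b1 b2 x acc (fun y hy => h x hx y (hacc y hy))]
    exact ih _ (fun z hz => hxs z (List.mem_cons_of_mem _ hz))
      (fun y hy => (PySem.List.mem_insertBy b2 x y acc).mp hy |>.elim
        (fun e => e ▸ hx) (hacc y))

-- stable reverse sort only looks at keys of members of the list
theorem sorted_rev_key_congr {α κ : Type} [LT κ] [DecidableLT κ]
    (xs : List α) (k1 k2 : α → κ) (h : ∀ x ∈ xs, k1 x = k2 x) :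
    PySem.List.sorted xs k1 true = PySem.List.sorted xs k2 true := by
  rw [PySem.List.sorted_rev_eq_foldl_insertBy, PySem.List.sorted_rev_eq_foldl_insertBy]
  exact foldl_insertBy_congr _ _ xs
    (fun a ha b hb => by rw [h a ha, h b hb]) xs [] (fun x hx => hx) (by simp)

-- insertBy skips a prefix it never inserts before
theorem insertBy_append_left {α : Type} (before : α → α → Bool) (x : α) (A B : List α)
    (h : ∀ a ∈ A, before x a = false) :
    PySem.List.insertBy before x (A ++ B) = A ++ PySem.List.insertBy before x B := by
  induction A with
  | nil => rfl
  | cons a A ih =>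
    simp only [List.cons_append, PySem.List.insertBy, h a (List.mem_cons_self ..)]
    simp [ih (fun z hz => h z (List.mem_cons_of_mem _ hz))]

-- insertBy puts x in front when it inserts before every element
theorem insertBy_all_before {α : Type} (before : α → α → Bool) (x : α) (B : List α)
    (h : ∀ b ∈ B, before x b = true) :
    PySem.List.insertBy before x B = x :: B := by
  cases B with
  | nil => rfl
  | cons b B => simp [PySem.List.insertBy, h b (List.mem_cons_self ..)]

-- the class-comparator insertion sort computes the bucket normal form
theorem foldl_insertBy_cls (xs : List String) :
    ∀ (p : List String),
      xs.foldl (fun acc x => PySem.List.insertBy (fun a b => decide (pvCls a < pvCls b)) x acc)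
        (pvBuckets p) = pvBuckets (p ++ xs) := by
  induction xs with
  | nil => intro p; simp
  | cons x xs ih =>
    intro p
    have hmem : ∀ (k : Nat) (a : String), a ∈ p.filter (fun i => pvCls i == k) → pvCls a = k := by
      intro k a ha
      have := (List.mem_filter.mp ha).2
      simpa using this
    have hstep : PySem.List.insertBy (fun a b => decide (pvCls a < pvCls b)) x (pvBuckets p)
        = pvBuckets (p ++ [x]) := by
      have h4 : pvCls x = 0 ∨ pvCls x = 1 ∨ pvCls x = 2 ∨ pvCls x = 3 := by
        unfold pvCls; split_ifs <;> simp
      rcases h4 with hc | hc | hc | hc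
      · rw [show pvBuckets p = p.filter (fun i => pvCls i == 0)
            ++ (p.filter (fun i => pvCls i == 1) ++ (p.filter (fun i => pvCls i == 2)
            ++ p.filter (fun i => pvCls i == 3))) by simp [pvBuckets]]
        rw [insertBy_append_left _ _ _ _ (fun a ha => by simp [hc, hmem 0 a ha])]
        rw [insertBy_all_before _ _ _
          (fun b hb => by
            simp only [List.mem_append] at hb
            rcases hb with hb | hb | hb
            · simp [hc, hmem 1 b hb]
            · simp [hc, hmem 2 b hb]
            · simp [hc, hmem 3 b hb])]
        simp [pvBuckets, List.filter_append, hc]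
      · rw [show pvBuckets p = (p.filter (fun i => pvCls i == 0)
            ++ p.filter (fun i => pvCls i == 1)) ++ (p.filter (fun i => pvCls i == 2)
            ++ p.filter (fun i => pvCls i == 3)) by simp [pvBuckets]]
        rw [insertBy_append_left _ _ _ _
          (fun a ha => by
            simp only [List.mem_append] at ha
            rcases ha with ha | ha
            · simp [hc, hmem 0 a ha]
            · simp [hc, hmem 1 a ha])]
        rw [insertBy_all_before _ _ _
          (fun b hb => by
            simp only [List.mem_append] at hb
            rcases hb with hb | hb
            · simp [hc, hmem 2 b hb]
            · simp [hc, hmem 3 b hb])]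
        simp [pvBuckets, List.filter_append, hc]
      · rw [show pvBuckets p = (p.filter (fun i => pvCls i == 0)
            ++ p.filter (fun i => pvCls i == 1) ++ p.filter (fun i => pvCls i == 2))
            ++ p.filter (fun i => pvCls i == 3) by simp [pvBuckets]]
        rw [insertBy_append_left _ _ _ _
          (fun a ha => by
            simp only [List.mem_append] at ha
            rcases ha with (ha | ha) | ha
            · simp [hc, hmem 0 a ha]
            · simp [hc, hmem 1 a ha]
            · simp [hc, hmem 2 a ha])]
        rw [insertBy_all_before _ _ _ (fun b hb => by simp [hc, hmem 3 b hb])]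
        simp [pvBuckets, List.filter_append, hc]
      · rw [show pvBuckets p = (p.filter (fun i => pvCls i == 0)
            ++ p.filter (fun i => pvCls i == 1) ++ p.filter (fun i => pvCls i == 2)
            ++ p.filter (fun i => pvCls i == 3)) ++ ([] : List String) by simp [pvBuckets]]
        rw [insertBy_append_left _ _ _ _
          (fun a ha => by
            simp only [List.mem_append] at ha
            rcases ha with ((ha | ha) | ha) | ha
            · simp [hc, hmem 0 a ha]
            · simp [hc, hmem 1 a ha]
            · simp [hc, hmem 2 a ha]
            · simp [hc, hmem 3 a ha])]
        simp [pvBuckets, PySem.List.insertBy, List.filter_append, hc]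
    rw [List.foldl_cons, hstep]
    simpa using ih (p ++ [x])

-- each of B's filters is a pvCls bucket
theorem alt_eq_buckets (images : List String)
    (config : List (String × List (String × List (String × List (String × Bool))))) :
    calculate_build_priority_alt images config = pvBuckets images := by
  unfold calculate_build_priority_alt pvBuckets
  simp only [List.foldl_cons, List.foldl_nil, List.nil_append]
  rw [List.filter_congr (fun a _ => show (a == "ubuntu-24.04") = (pvCls a == 0) by
        unfold pvCls; split_ifs <;> simp_all),
      List.filter_congr (fun a _ => show (a == "ubuntu-22.04") = (pvCls a == 1) by
        unfold pvCls; split_ifs <;> simp_all),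
      List.filter_congr (fun a _ => show (a == "alpine-3.20") = (pvCls a == 2) by
        unfold pvCls; split_ifs <;> simp_all),
      List.filter_congr (fun a _ =>
        show (!(["ubuntu-24.04", "ubuntu-22.04", "alpine-3.20"] : List String).contains a)
            = (pvCls a == 3) by
        unfold pvCls; split_ifs <;> simp_all)]

set_option maxHeartbeats 1600000 in
theorem calculate_build_priority_eq (images : List String)
    (config : List (String × List (String × List (String × List (String × Bool))))) :
    calculate_build_priority images config = calculate_build_priority_alt images config := by
  rw [alt_eq_buckets]
  show PySem.List.sorted images _ true = _
  rw [sorted_rev_key_congr images _ (fun img =>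
      let tools : List (String × List (String × List (String × Bool))) :=
        PySem.Dict.getD ⟨config⟩ "tools" []
      let priority : Int := 0
      let priority : Int :=
        if img = "ubuntu-24.04" then priority + 10
        else if img = "ubuntu-22.04" then priority + 8
        else if img = "alpine-3.20" then priority + 6
        else priority
      let priority : Int :=
        if PySem.Dict.getD ⟨PySem.Dict.getD ⟨PySem.Dict.getD ⟨tools⟩ "languages" []⟩ "go" []⟩ "install" false
        then priority + 5 else priority
      let priority : Int :=
        if PySem.Dict.getD ⟨PySem.Dict.getD ⟨PySem.Dict.getD ⟨tools⟩ "security" []⟩ "trivy" []⟩ "install" false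
        then priority + 4 else priority
      if PySem.Dict.getD ⟨PySem.Dict.getD ⟨PySem.Dict.getD ⟨tools⟩ "devops" []⟩ "docker" []⟩ "install" false
      then priority + 3 else priority)
    (fun x hx => by rw [getD_foldl_insert, if_pos hx])]
  rw [PySem.List.sorted_rev_eq_foldl_insertBy]
  have hcmp : (fun (a b : String) => decide
      ((let tools : List (String × List (String × List (String × Bool))) :=
          PySem.Dict.getD ⟨config⟩ "tools" []
        let priority : Int := 0
        let priority : Int :=
          if b = "ubuntu-24.04" then priority + 10
          else if b = "ubuntu-22.04" then priority + 8
          else if b = "alpine-3.20" then priority + 6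
          else priority
        let priority : Int :=
          if PySem.Dict.getD ⟨PySem.Dict.getD ⟨PySem.Dict.getD ⟨tools⟩ "languages" []⟩ "go" []⟩ "install" false
          then priority + 5 else priority
        let priority : Int :=
          if PySem.Dict.getD ⟨PySem.Dict.getD ⟨PySem.Dict.getD ⟨tools⟩ "security" []⟩ "trivy" []⟩ "install" false
          then priority + 4 else priority
        if PySem.Dict.getD ⟨PySem.Dict.getD ⟨PySem.Dict.getD ⟨tools⟩ "devops" []⟩ "docker" []⟩ "install" false
        then priority + 3 else priority)
      < (let tools : List (String × List (String × List (String × Bool))) :=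
          PySem.Dict.getD ⟨config⟩ "tools" []
        let priority : Int := 0
        let priority : Int :=
          if a = "ubuntu-24.04" then priority + 10
          else if a = "ubuntu-22.04" then priority + 8
          else if a = "alpine-3.20" then priority + 6
          else priority
        let priority : Int :=
          if PySem.Dict.getD ⟨PySem.Dict.getD ⟨PySem.Dict.getD ⟨tools⟩ "languages" []⟩ "go" []⟩ "install" false
          then priority + 5 else priority
        let priority : Int :=
          if PySem.Dict.getD ⟨PySem.Dict.getD ⟨PySem.Dict.getD ⟨tools⟩ "security" []⟩ "trivy" []⟩ "install" false
          then priority + 4 else priority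
        if PySem.Dict.getD ⟨PySem.Dict.getD ⟨PySem.Dict.getD ⟨tools⟩ "devops" []⟩ "docker" []⟩ "install" false
        then priority + 3 else priority)))
      = (fun (a b : String) => decide (pvCls a < pvCls b)) := by
    funext a b
    simp only [pvCls]
    split_ifs <;> simp_all
  rw [hcmp]
  have h := foldl_insertBy_cls images []
  simpa [pvBuckets] using h

-- ===== VERDICT =====
theorem calculate_build_priority_spec : Claim_equal_calculate_build_priority := by
  intro images config _
  unfold Spec_calculate_build_priority
  exact calculate_build_priority_eq images config
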